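-- pv_equiv track=rewrite | github.com/sourcedexter/rasa_core | rasa_core/featurizers.py | _parse_feature_map
-- ===== SOURCE A (Python) =====
-- def _parse_feature_map(input_state_map):
--     """Create vocabularies for a user and the bot"""
--     user_labels = []  # intents and entities
--     bot_labels = []  # actions and utters
--     other_labels = []  # slots
--     for feature_name in input_state_map.keys():
--         if (feature_name.startswith('intent_')
--                 # include entity as user input
--                 or feature_name.startswith('entity_')):
--             user_labels.append(feature_name)
--         elif feature_name.startswith('prev_'):
--             bot_labels.append(feature_name[len('prev_'):])
--         else:
--             other_labels.append(feature_name)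
--
--     return user_labels, bot_labels, other_labels
-- ===== SOURCE B (Python) =====
-- def _classify(feature_name):
--     """Map a feature name to (bucket tag, output label)."""
--     if feature_name.startswith('intent_') or feature_name.startswith('entity_'):
--         return (0, feature_name)
--     if feature_name.startswith('prev_'):
--         return (1, feature_name[len('prev_'):])
--     return (2, feature_name)
--
--
-- def _parse_feature_map(input_state_map):
--     """Create vocabularies for a user and the bot"""
--     pairs = sorted((_classify(k) for k in input_state_map.keys()),
--                    key=lambda p: p[0])  # stable: keeps original order inside each bucket
--     tags = [t for t, _ in pairs]
--     labels = [l for _, l in pairs]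
--     i = tags.count(0)
--     j = i + tags.count(1)
--     return labels[:i], labels[i:j], labels[j:]
-- ===== Notes on version B (the rewrite author's own statement) =====
-- stated objective: alternative
-- what changed: Instead of fanning keys out into three accumulators in one loop, B tags each key with a bucket number, stable-sorts the tagged pairs by tag (stability preserves the original order inside each bucket), and then slices the sorted label list at boundaries obtained by counting the tags.
import Mathlib
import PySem

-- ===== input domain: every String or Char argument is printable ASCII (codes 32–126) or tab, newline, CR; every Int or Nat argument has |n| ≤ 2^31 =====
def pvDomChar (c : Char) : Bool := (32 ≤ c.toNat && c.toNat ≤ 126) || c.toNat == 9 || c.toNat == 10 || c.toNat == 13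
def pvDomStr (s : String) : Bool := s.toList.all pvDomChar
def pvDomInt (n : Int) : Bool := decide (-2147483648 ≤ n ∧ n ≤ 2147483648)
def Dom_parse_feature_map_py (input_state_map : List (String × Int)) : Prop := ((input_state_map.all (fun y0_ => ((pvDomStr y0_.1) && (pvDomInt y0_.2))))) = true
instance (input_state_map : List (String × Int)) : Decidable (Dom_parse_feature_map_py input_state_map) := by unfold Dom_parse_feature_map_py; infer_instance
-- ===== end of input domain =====

-- B replaces A's single fan-out loop by tag / stable-sort by tag / count-and-slice (objective: alternative).

-- ===== PORT A =====
-- one pass over the keys, three growing accumulators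
def parse_feature_map_py (input_state_map : List (String × Int)) : List String × List String × List String :=
  (PySem.List.dedup (input_state_map.map Prod.fst)).foldl
    (fun acc feature_name =>
      if PySem.Str.startswith feature_name "intent_" || PySem.Str.startswith feature_name "entity_" then
        (acc.1 ++ [feature_name], acc.2.1, acc.2.2)
      else if PySem.Str.startswith feature_name "prev_" then
        (acc.1, acc.2.1 ++ [PySem.Str.slice feature_name (some 5) none], acc.2.2)
      else
        (acc.1, acc.2.1, acc.2.2 ++ [feature_name]))
    ([], [], [])

-- ===== PORT B =====
-- _classify: key ↦ (bucket tag, output label)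
def pvClassify (feature_name : String) : Int × String :=
  if PySem.Str.startswith feature_name "intent_" || PySem.Str.startswith feature_name "entity_" then
    (0, feature_name)
  else if PySem.Str.startswith feature_name "prev_" then
    (1, PySem.Str.slice feature_name (some 5) none)
  else
    (2, feature_name)

-- tag every key, stable-sort by tag, then slice at boundaries obtained by counting tags
def parse_feature_map_py_alt (input_state_map : List (String × Int)) : List String × List String × List String :=
  let pairs := PySem.List.sorted ((PySem.List.dedup (input_state_map.map Prod.fst)).map pvClassify) (fun p => p.1)
  let tags := pairs.map Prod.fst
  let labels := pairs.map Prod.snd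
  let i : Int := (PySem.List.count tags 0 : Int)
  let j : Int := i + (PySem.List.count tags 1 : Int)
  (PySem.List.slice labels none (some i),
   PySem.List.slice labels (some i) (some j),
   PySem.List.slice labels (some j) none)

-- ===== PRECONDITION & SPEC =====
def Spec_parse_feature_map_py (input_state_map : List (String × Int)) (out : List String × List String × List String) : Prop := out = parse_feature_map_py_alt input_state_map
instance (input_state_map : List (String × Int)) (out : List String × List String × List String) : Decidable (Spec_parse_feature_map_py input_state_map out) := by unfold Spec_parse_feature_map_py; infer_instance

-- ===== CLAIM (what is proved, stated in full; the proofs are below) =====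
def Claim_equal_parse_feature_map_py : Prop := ∀ (input_state_map : List (String × Int)), Dom_parse_feature_map_py input_state_map → Spec_parse_feature_map_py input_state_map (parse_feature_map_py input_state_map)

-- ===== LEMMAS AND PROOFS =====

-- a string cannot start with both "intent_"/"entity_" and "prev_"
theorem not_both_prefixes (k : String)
    (h1 : (PySem.Str.startswith k "intent_" || PySem.Str.startswith k "entity_") = true) :
    PySem.Str.startswith k "prev_" = false := by
  rcases Bool.or_eq_true_iff.mp h1 with h | h <;>
  · simp [PySem.Str.startswith_eq] at h ⊢
    rw [Bool.eq_false_iff]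
    intro hp
    have hA := (PySem.Chars.startswith_iff _ _).mp h
    have hB := (PySem.Chars.startswith_iff _ _).mp hp
    obtain ⟨t, ht⟩ := hA
    rw [← ht] at hB
    simp [List.cons_prefix_cons] at hB

-- A's loop = three filtered sublists
theorem fold_split (ks : List String) (u b o : List String) :
    ks.foldl
      (fun acc feature_name =>
        if PySem.Str.startswith feature_name "intent_" || PySem.Str.startswith feature_name "entity_" then
          (acc.1 ++ [feature_name], acc.2.1, acc.2.2)
        else if PySem.Str.startswith feature_name "prev_" then
          (acc.1, acc.2.1 ++ [PySem.Str.slice feature_name (some 5) none], acc.2.2)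
        else
          (acc.1, acc.2.1, acc.2.2 ++ [feature_name]))
      (u, b, o)
    = (u ++ ks.filter (fun k => PySem.Str.startswith k "intent_" || PySem.Str.startswith k "entity_"),
       b ++ (ks.filter (fun k => PySem.Str.startswith k "prev_")).map
              (fun k => PySem.Str.slice k (some 5) none),
       o ++ ks.filter (fun k => !(PySem.Str.startswith k "intent_" || PySem.Str.startswith k "entity_"
                                  || PySem.Str.startswith k "prev_"))) := by
  induction ks generalizing u b o with
  | nil => simp
  | cons k ks ih =>
    simp only [List.foldl_cons, List.filter_cons]
    simp only [PySem.Str.startswith_eq] at ih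
    simp at ih
    by_cases hu : (PySem.Str.startswith k "intent_" || PySem.Str.startswith k "entity_") = true
    · have hp := not_both_prefixes k hu
      simp [PySem.Str.startswith_eq] at hu hp
      rcases hu with h | h <;> simp [h, hp, ih, List.append_assoc]
    · rw [Bool.not_eq_true, Bool.or_eq_false_iff] at hu
      by_cases hp : PySem.Str.startswith k "prev_" = true
      · simp [PySem.Str.startswith_eq] at hu hp
        simp [hu.1, hu.2, hp, ih, List.append_assoc]
      · rw [Bool.not_eq_true] at hp
        simp [PySem.Str.startswith_eq] at hu hp
        simp [hu.1, hu.2, hp, ih, List.append_assoc]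

-- insertBy places x right between a no-before prefix and an all-before suffix
theorem insertBy_mid {α : Type} (before : α → α → Bool) (x : α) (as bs : List α)
    (h1 : ∀ a ∈ as, before x a = false) (h2 : ∀ b ∈ bs, before x b = true) :
    PySem.List.insertBy before x (as ++ bs) = as ++ x :: bs := by
  induction as with
  | nil =>
    cases bs with
    | nil => simp [PySem.List.insertBy]
    | cons b bs => simp [PySem.List.insertBy, h2 b (by simp)]
  | cons a as ih =>
    simp [PySem.List.insertBy, h1 a (by simp),
      ih (fun a' ha' => h1 a' (by simp [ha'])) ]

-- the insertion-sort fold over {0,1,2}-tagged pairs keeps the three buckets concatenated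
theorem fold_tri (ps : List (Int × String)) (a0 a1 a2 : List (Int × String))
    (h0 : ∀ p ∈ a0, p.1 = 0) (h1 : ∀ p ∈ a1, p.1 = 1) (h2 : ∀ p ∈ a2, p.1 = 2)
    (hps : ∀ p ∈ ps, p.1 = 0 ∨ p.1 = 1 ∨ p.1 = 2) :
    ps.foldl (fun acc x => PySem.List.insertBy (fun a b => decide (a.1 < b.1)) x acc)
      (a0 ++ a1 ++ a2)
    = (a0 ++ ps.filter (fun p => p.1 == 0)) ++ (a1 ++ ps.filter (fun p => p.1 == 1))
      ++ (a2 ++ ps.filter (fun p => p.1 == 2)) := by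
  induction ps generalizing a0 a1 a2 with
  | nil => simp
  | cons x ps ih =>
    simp only [List.foldl_cons, List.filter_cons]
    rcases hps x (by simp) with hx | hx | hx
    · have hins : PySem.List.insertBy (fun a b => decide (a.1 < b.1)) x (a0 ++ a1 ++ a2)
          = a0 ++ x :: (a1 ++ a2) := by
        rw [List.append_assoc]
        exact insertBy_mid _ x a0 (a1 ++ a2)
          (fun a ha => by simp [h0 a ha, hx])
          (fun b hb => by rcases List.mem_append.mp hb with h | h
                          · simp [h1 b h, hx]
                          · simp [h2 b h, hx])
      rw [hins]
      have := ih (a0 ++ [x]) a1 a2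
        (fun p hp => by rcases List.mem_append.mp hp with h | h
                        · exact h0 p h
                        · simp at h; simp [h, hx]) h1 h2
        (fun p hp => hps p (by simp [hp]))
      simpa [hx, List.append_assoc] using this
    · have hins : PySem.List.insertBy (fun a b => decide (a.1 < b.1)) x (a0 ++ a1 ++ a2)
          = (a0 ++ a1) ++ x :: a2 :=
        insertBy_mid _ x (a0 ++ a1) a2
          (fun a ha => by rcases List.mem_append.mp ha with h | h
                          · simp [h0 a h, hx]
                          · simp [h1 a h, hx])
          (fun b hb => by simp [h2 b hb, hx])
      rw [hins]
      have := ih a0 (a1 ++ [x]) a2 h0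
        (fun p hp => by rcases List.mem_append.mp hp with h | h
                        · exact h1 p h
                        · simp at h; simp [h, hx]) h2
        (fun p hp => hps p (by simp [hp]))
      simpa [hx, List.append_assoc] using this
    · have hins : PySem.List.insertBy (fun a b => decide (a.1 < b.1)) x (a0 ++ a1 ++ a2)
          = (a0 ++ a1 ++ a2) ++ [x] :=
        PySem.List.insertBy_of_forall_not_before _ x _
          (fun a ha => by
            rcases List.mem_append.mp ha with h | h
            · rcases List.mem_append.mp h with h' | h'
              · simp [h0 a h', hx]
              · simp [h1 a h', hx]
            · simp [h2 a h, hx])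
      rw [hins]
      have := ih a0 a1 (a2 ++ [x]) h0 h1
        (fun p hp => by rcases List.mem_append.mp hp with h | h
                        · exact h2 p h
                        · simp at h; simp [h, hx])
        (fun p hp => hps p (by simp [hp]))
      simpa [hx, List.append_assoc] using this

-- stable sort of {0,1,2}-tagged pairs = the three buckets in order
theorem sorted_tri (ps : List (Int × String))
    (hps : ∀ p ∈ ps, p.1 = 0 ∨ p.1 = 1 ∨ p.1 = 2) :
    PySem.List.sorted ps (fun p => p.1)
    = ps.filter (fun p => p.1 == 0) ++ ps.filter (fun p => p.1 == 1)
      ++ ps.filter (fun p => p.1 == 2) := by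
  rw [PySem.List.sorted_eq_foldl_insertBy]
  have := fold_tri ps [] [] [] (by simp) (by simp) (by simp) hps
  simpa using this

-- the three tag-filters of the classified keys are the three filtered key lists
theorem filt0 (ks : List String) :
    ((ks.map pvClassify).filter (fun p => p.1 == 0))
    = (ks.filter (fun k => PySem.Str.startswith k "intent_" || PySem.Str.startswith k "entity_")).map
        (fun k => ((0 : Int), k)) := by
  induction ks with
  | nil => simp
  | cons k ks ih =>
    by_cases hu : (PySem.Str.startswith k "intent_" || PySem.Str.startswith k "entity_") = true
    · have hnp := not_both_prefixes k hu
      simp [PySem.Str.startswith_eq] at hu hnp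
      rcases hu with h | h <;>
        simp [pvClassify, h, ih]
    · rw [Bool.not_eq_true, Bool.or_eq_false_iff] at hu
      simp [PySem.Str.startswith_eq] at hu
      by_cases hp : PySem.Str.startswith k "prev_" = true
      · simp [PySem.Str.startswith_eq] at hp
        simp [pvClassify, hu.1, hu.2, hp, ih]
      · rw [Bool.not_eq_true] at hp
        simp [PySem.Str.startswith_eq] at hp
        simp [pvClassify, hu.1, hu.2, hp, ih]

theorem filt1 (ks : List String) :
    ((ks.map pvClassify).filter (fun p => p.1 == 1))
    = (ks.filter (fun k => PySem.Str.startswith k "prev_")).map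
        (fun k => ((1 : Int), PySem.Str.slice k (some 5) none)) := by
  induction ks with
  | nil => simp
  | cons k ks ih =>
    by_cases hu : (PySem.Str.startswith k "intent_" || PySem.Str.startswith k "entity_") = true
    · have hnp := not_both_prefixes k hu
      simp [PySem.Str.startswith_eq] at hu hnp
      rcases hu with h | h <;>
        simp [pvClassify, h, hnp, ih]
    · rw [Bool.not_eq_true, Bool.or_eq_false_iff] at hu
      simp [PySem.Str.startswith_eq] at hu
      by_cases hp : PySem.Str.startswith k "prev_" = true
      · simp [PySem.Str.startswith_eq] at hp
        simp [pvClassify, hu.1, hu.2, hp, ih]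
      · rw [Bool.not_eq_true] at hp
        simp [PySem.Str.startswith_eq] at hp
        simp [pvClassify, hu.1, hu.2, hp, ih]

theorem filt2 (ks : List String) :
    ((ks.map pvClassify).filter (fun p => p.1 == 2))
    = (ks.filter (fun k => !(PySem.Str.startswith k "intent_" || PySem.Str.startswith k "entity_"
                            || PySem.Str.startswith k "prev_"))).map
        (fun k => ((2 : Int), k)) := by
  induction ks with
  | nil => simp
  | cons k ks ih =>
    by_cases hu : (PySem.Str.startswith k "intent_" || PySem.Str.startswith k "entity_") = true
    · have hnp := not_both_prefixes k hu
      simp [PySem.Str.startswith_eq] at hu hnp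
      rcases hu with h | h <;>
        simp [pvClassify, h, hnp, ih]
    · rw [Bool.not_eq_true, Bool.or_eq_false_iff] at hu
      simp [PySem.Str.startswith_eq] at hu
      by_cases hp : PySem.Str.startswith k "prev_" = true
      · simp [PySem.Str.startswith_eq] at hp
        simp [pvClassify, hu.1, hu.2, hp, ih]
      · rw [Bool.not_eq_true] at hp
        simp [PySem.Str.startswith_eq] at hp
        simp [pvClassify, hu.1, hu.2, hp, ih]

-- every classified pair carries tag 0, 1 or 2
theorem classify_tags (ks : List String) :
    ∀ p ∈ ks.map pvClassify, p.1 = 0 ∨ p.1 = 1 ∨ p.1 = 2 := by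
  intro p hp
  rcases List.mem_map.mp hp with ⟨k, _, rfl⟩
  unfold pvClassify
  split_ifs <;> simp

-- ===== VERDICT (by name: the statement is the Claim_ definition above) =====
theorem parse_feature_map_py_spec : Claim_equal_parse_feature_map_py := by
  intro m _
  unfold Spec_parse_feature_map_py parse_feature_map_py parse_feature_map_py_alt
  rw [fold_split (PySem.List.dedup (m.map Prod.fst)) [] [] []]
  set ks := PySem.List.dedup (m.map Prod.fst) with hks
  rw [sorted_tri (ks.map pvClassify) (classify_tags ks), filt0, filt1, filt2]
  set L0 := ks.filter (fun k => PySem.Str.startswith k "intent_" || PySem.Str.startswith k "entity_")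
  set L1 := ks.filter (fun k => PySem.Str.startswith k "prev_")
  set L2 := ks.filter (fun k => !(PySem.Str.startswith k "intent_" || PySem.Str.startswith k "entity_"
                                  || PySem.Str.startswith k "prev_"))
  simp only [List.map_append, List.map_map, PySem.List.count_eq, List.count_append]
  have e0 : List.map (Prod.snd ∘ fun k => ((0:Int), k)) L0 = L0 := by simp
  have e1 : List.map (Prod.snd ∘ fun k => ((1:Int), PySem.Str.slice k (some 5) none)) L1
      = L1.map (fun k => PySem.Str.slice k (some 5) none) := by simp
  have e2 : List.map (Prod.snd ∘ fun k => ((2:Int), k)) L2 = L2 := by simp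
  have f0 : List.map (Prod.fst ∘ fun k => ((0:Int), k)) L0 = List.replicate L0.length 0 := by
    rw [show (Prod.fst ∘ fun k : String => ((0:Int), k)) = fun _ => (0:Int) from rfl, List.map_const']
  have f1 : List.map (Prod.fst ∘ fun k => ((1:Int), PySem.Str.slice k (some 5) none)) L1
      = List.replicate L1.length 1 := by
    rw [show (Prod.fst ∘ fun k : String => ((1:Int), PySem.Str.slice k (some 5) none)) = fun _ => (1:Int) from rfl, List.map_const']
  have f2 : List.map (Prod.fst ∘ fun k => ((2:Int), k)) L2 = List.replicate L2.length 2 := by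
    rw [show (Prod.fst ∘ fun k : String => ((2:Int), k)) = fun _ => (2:Int) from rfl, List.map_const']
  rw [e0, e1, e2, f0, f1, f2]
  simp only [List.count_replicate]
  norm_num
  constructor
  · rw [PySem.List.slice_natCast_add, List.drop_left]
    exact (List.take_left' (by simp)).symm
  · rw [← Nat.cast_add, PySem.List.slice_from_natCast, ← List.append_assoc]
    exact (List.drop_left' (by simp)).symm
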